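-- pv_equiv track=rewrite | github.com/CedricKun/SVS | Calibration/build/lib/Core/texture_extractor.py | fillContour
-- ===== SOURCE A (Python) =====
-- def fillContour(_contours):
--     c_pairs = []
--     for idx, sub in enumerate(_contours):
--         sub = sorted(sub, key=lambda s: (s[0], s[1]))
--         _contours[idx] = sub
--         pairs = []
--         for c in sub:
--             if not len(pairs):
--                 pairs.append([c, c])
--                 continue
--             if c[0] != pairs[-1][0][0]:
--                 pairs.append([c, c])
--                 continue
--             if c[0] == pairs[-1][0][0] and c[1] > pairs[-1][1][1]:
--                 pairs[-1][1] = c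
--                 continue
--         c_pairs.append(pairs)
--     fill_con = []
--     for pair in c_pairs:
--         point_set = []
--         for p in pair:
--             if p[0] == p[1]: point_set.append(p[0])
--             else:
--                 for i in range(int(p[0][1]), int(p[1][1] + 1)):
--                     point_set.append([p[0][0], i])
--         fill_con.append(point_set)
--     return fill_con
-- ===== SOURCE B (Python) =====
-- # B: no sort of the points at all — one dict-aggregation pass over the raw sub
-- # (x -> [first point with that x, min y, max y]), then emit over the sorted distinct
-- # x keys only.  Return-value equivalence: unlike A, B does NOT replace each sub-list
-- # of _contours by its sorted copy in place.
-- def fillContour(_contours):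
--     fill_con = []
--     for sub in _contours:
--         agg = {}
--         for p in sub:
--             x, y = p[0], p[1]
--             if x not in agg:
--                 agg[x] = [p, y, y]
--             else:
--                 e = agg[x]
--                 if y < e[1]: e[1] = y
--                 if y > e[2]: e[2] = y
--         point_set = []
--         for x in sorted(agg):
--             rep, lo, hi = agg[x]
--             if lo == hi:
--                 point_set.append(rep)
--             else:
--                 point_set.extend([x, i] for i in range(int(lo), int(hi) + 1))
--         fill_con.append(point_set)
--     return fill_con
-- ===== Notes on version B (the rewrite author's own statement) =====
-- stated objective: alternative
-- what changed: A sorts every sub-contour and runs a pairs[-1] state machine over the sorted points plus a second emit pass; B never sorts the points at all: one dict-aggregation pass over the raw sub (x -> first point, min y, max y) and an emit pass over the sorted distinct x keys only.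
import Mathlib
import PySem

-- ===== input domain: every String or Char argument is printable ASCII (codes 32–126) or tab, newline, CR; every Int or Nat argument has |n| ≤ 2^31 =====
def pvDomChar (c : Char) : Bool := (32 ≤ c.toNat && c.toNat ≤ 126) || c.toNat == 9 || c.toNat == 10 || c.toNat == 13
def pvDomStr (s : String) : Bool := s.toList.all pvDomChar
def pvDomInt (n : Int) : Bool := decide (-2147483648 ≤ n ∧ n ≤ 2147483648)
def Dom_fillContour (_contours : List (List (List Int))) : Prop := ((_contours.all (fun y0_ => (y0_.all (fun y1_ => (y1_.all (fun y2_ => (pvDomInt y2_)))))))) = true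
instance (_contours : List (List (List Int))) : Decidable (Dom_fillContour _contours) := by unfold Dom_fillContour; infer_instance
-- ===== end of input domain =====

-- B drops A's sort of the points entirely: one dict-aggregation pass over the raw
-- sub-contour (x -> (first point with that x, min y, max y)), then an emit pass over
-- the sorted distinct x keys only.  Equivalence is about the RETURN value: A replaces
-- each sub-list of _contours by its sorted copy in place, B does not mutate it.

-- x- and y-coordinate of a point, Python's p[0] / p[1] (Pre_ keeps them in range)
def pvX (p : List Int) : Int := PySem.List.pyGetD p 0 0
def pvY (p : List Int) : Int := PySem.List.pyGetD p 1 0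

-- ===== PORT A =====
-- one step of A's 'for c in sub' loop over the pairs list (a pair [p0,p1] is a product)
def pvStepA (pairs : List (List Int × List Int)) (c : List Int) : List (List Int × List Int) :=
  if pairs.length = 0 then pairs ++ [(c, c)]
  else
    let lastp := pairs.getLastD ([], [])
    if pvX c ≠ pvX lastp.1 then pairs ++ [(c, c)]
    else if pvX c = pvX lastp.1 ∧ pvY lastp.2 < pvY c then pairs.dropLast ++ [(lastp.1, c)]
    else pairs

-- the body of A's 'for p in pair' emit loop
def pvEmitA (p : List Int × List Int) : List (List Int) :=
  if p.1 = p.2 then [p.1]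
  else (PySem.List.pyRange (pvY p.1) (pvY p.2 + 1) 1).map (fun i => [pvX p.1, i])

def fillContour (_contours : List (List (List Int))) : List (List (List Int)) :=
  let c_pairs := _contours.foldl (fun acc sub =>
    acc ++ [(PySem.List.sorted2 sub pvX pvY false).foldl pvStepA []]) []
  c_pairs.foldl (fun acc pair =>
    acc ++ [pair.foldl (fun ps p => ps ++ pvEmitA p) []]) []

-- ===== PORT B =====
-- B's inner dict update: agg[x] = [p, y, y] for a new x, else shrink/grow [rep, lo, hi]
def pvAggStep (d : PySem.Dict Int (List Int × Int × Int)) (p : List Int) :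
    PySem.Dict Int (List Int × Int × Int) :=
  match d.get? (pvX p) with
  | none => d.insert (pvX p) (p, pvY p, pvY p)
  | some e => d.insert (pvX p)
      (e.1, if pvY p < e.2.1 then pvY p else e.2.1, if e.2.2 < pvY p then pvY p else e.2.2)

-- B's per-key emission from the aggregated triple (rep, lo, hi)
def pvEmitB (e : List Int × Int × Int) (x : Int) : List (List Int) :=
  if e.2.1 = e.2.2 then [e.1]
  else (PySem.List.pyRange e.2.1 (e.2.2 + 1) 1).map (fun i => [x, i])

def fillContour_alt (_contours : List (List (List Int))) : List (List (List Int)) :=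
  _contours.foldl (fun acc sub =>
    let agg := sub.foldl pvAggStep PySem.Dict.empty
    acc ++ [(PySem.List.sorted agg.keys (fun x => x) false).foldl (fun ps x =>
      match agg.get? x with
      | some e => ps ++ pvEmitB e x
      | none => ps) []]) []

-- ===== PRECONDITION & SPEC =====
-- Pre_ excludes exactly the inputs where Python A raises IndexError: a point with
-- fewer than two coordinates (s[0]/s[1] in the sort key, c[0]/c[1] in the loop).
def Pre_fillContour (_contours : List (List (List Int))) : Prop :=
  ∀ sub ∈ _contours, ∀ p ∈ sub, 2 ≤ p.length
instance (_contours : List (List (List Int))) : Decidable (Pre_fillContour _contours) := by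
  unfold Pre_fillContour; infer_instance

def pvWitness_fillContour : List (List (List Int)) := [[[1, 3], [0, 0], [1, 1], [0, 0, 5]]]

def Spec_fillContour (_contours : List (List (List Int))) (out : List (List (List Int))) : Prop := out = fillContour_alt _contours
instance (_contours : List (List (List Int))) (out : List (List (List Int))) : Decidable (Spec_fillContour _contours out) := by unfold Spec_fillContour; infer_instance

-- ===== CLAIM (what is proved, stated in full; the proofs are below) =====
def Claim_equal_fillContour : Prop := ∀ (_contours : List (List (List Int))), Dom_fillContour _contours → Pre_fillContour _contours → Spec_fillContour _contours (fillContour _contours)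

-- ===== LEMMAS AND PROOFS =====

-- the (≤) order of the sort key (s[0], s[1])
def pvLexLE (a b : List Int) : Prop := pvX a < pvX b ∨ (pvX a = pvX b ∧ pvY a ≤ pvY b)

-- the filter predicate "p[0] == x"
def pvQ (x : Int) (p : List Int) : Bool := pvX p == x

-- the comparison sorted2 inserts with
def pvBef (a b : List Int) : Bool :=
  decide (pvX a < pvX b) || (!decide (pvX b < pvX a) && decide (pvY a < pvY b))

lemma pv_sorted2_foldl (xs : List (List Int)) :
    PySem.List.sorted2 xs pvX pvY false
      = xs.foldl (fun acc x => PySem.List.insertBy pvBef x acc) [] := rfl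

lemma pv_sorted2_pairwise (xs : List (List Int)) :
    List.Pairwise pvLexLE (PySem.List.sorted2 xs pvX pvY false) := by
  have hkey : PySem.List.sorted2 xs pvX pvY false
      = PySem.List.sorted xs (fun p => toLex (pvX p, pvY p)) false := by
    rw [PySem.List.sorted_eq_foldl_insertBy]
    show List.foldl _ [] xs = _
    congr 1
    funext acc x
    congr 1
    funext a b
    show (decide (pvX a < pvX b) || !decide (pvX b < pvX a) && decide (pvY a < pvY b))
        = decide (toLex (pvX a, pvY a) < toLex (pvX b, pvY b))
    by_cases h1 : pvX a < pvX b <;> by_cases h2 : pvX b < pvX a <;>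
      simp [h1, h2, Prod.Lex.lt_iff] <;> omega
  rw [hkey]
  refine (PySem.List.sorted_pairwise xs (fun p => toLex (pvX p, pvY p))).imp ?_
  intro a b hab
  rw [Prod.Lex.le_iff] at hab
  exact hab

-- insertBy unfolds
lemma pv_insertBy_cons (x y : List Int) (ys : List (List Int)) :
    PySem.List.insertBy pvBef x (y :: ys)
      = if pvBef x y then x :: y :: ys else y :: PySem.List.insertBy pvBef x ys := rfl

lemma pv_insertBy_eq (q : List Int) (l : List (List Int)) :
    PySem.List.insertBy pvBef q l
      = l.takeWhile (fun b => !pvBef q b) ++ q :: l.dropWhile (fun b => !pvBef q b) := by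
  induction l with
  | nil => rfl
  | cons y ys ih =>
    rw [pv_insertBy_cons]
    by_cases h : pvBef q y <;> simp [h, ih]

-- STABILITY of the sort for an x-class whose ys are all equal: the first element of
-- the sorted list with that x is the first element of the original with that x
lemma pv_stable (sub : List (List Int)) (x0 c : Int)
    (H : ∀ p ∈ sub, pvX p = x0 → pvY p = c) :
    ((PySem.List.sorted2 sub pvX pvY false).filter (pvQ x0)).head?
      = (sub.filter (pvQ x0)).head? := by
  induction sub using List.reverseRecOn with
  | nil => rfl
  | append_singleton l q ih =>
    have H' : ∀ p ∈ l, pvX p = x0 → pvY p = c := fun p hp => H p (by simp [hp])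
    have hfold : PySem.List.sorted2 (l ++ [q]) pvX pvY false
        = PySem.List.insertBy pvBef q (PySem.List.sorted2 l pvX pvY false) := by
      rw [pv_sorted2_foldl, pv_sorted2_foldl, List.foldl_append]
      rfl
    set acc := PySem.List.sorted2 l pvX pvY false with haccdef
    have hacc_pw : List.Pairwise pvLexLE acc := pv_sorted2_pairwise l
    have hperm : acc.Perm l := PySem.List.sorted2_perm l pvX pvY false
    set tw := acc.takeWhile (fun b => !pvBef q b) with htwdef
    set dw := acc.dropWhile (fun b => !pvBef q b) with hdwdef
    have hsplit : acc = tw ++ dw := (List.takeWhile_append_dropWhile).symm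
    rw [hfold, pv_insertBy_eq, List.filter_append, List.filter_append, List.filter_cons]
    by_cases hPq : pvQ x0 q = true
    · rw [if_pos hPq]
      have hxq : pvX q = x0 := by simpa [pvQ] using hPq
      have hyq : pvY q = c := H q (by simp) hxq
      have hiha : (acc.filter (pvQ x0)).head? = (l.filter (pvQ x0)).head? := ih H'
      have hacc_f : acc.filter (pvQ x0) = tw.filter (pvQ x0) ++ dw.filter (pvQ x0) := by
        conv_lhs => rw [hsplit]
        rw [List.filter_append]
      cases hfa : acc.filter (pvQ x0) with
      | nil =>
        have hfl : l.filter (pvQ x0) = [] := by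
          have hp := hperm.filter (pvQ x0)
          rw [hfa] at hp
          exact (List.Perm.nil_eq hp).symm
        have h2 : tw.filter (pvQ x0) = [] ∧ dw.filter (pvQ x0) = [] := by
          rw [hfa] at hacc_f
          exact List.append_eq_nil_iff.mp hacc_f.symm
        rw [h2.1, h2.2, hfl]
        simp [hPq]
      | cons e es =>
        have heL : (l.filter (pvQ x0)).head? = some e := by
          rw [← hiha, hfa]; rfl
        have hRHS : (l.filter (pvQ x0) ++ List.filter (pvQ x0) [q]).head? = some e := by
          rw [List.head?_append, heL]; rfl
        rw [hRHS]
        cases htf : tw.filter (pvQ x0) with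
        | cons f fs =>
          have : e = f := by
            rw [hacc_f, htf] at hfa
            exact (List.cons.injEq _ _ _ _ ▸ hfa).1.symm ▸ rfl
          subst this
          simp
        | nil =>
          exfalso
          have hdf : dw.filter (pvQ x0) = e :: es := by
            rw [hacc_f, htf] at hfa
            simpa using hfa
          have hemem : e ∈ dw := List.mem_of_mem_filter (by rw [hdf]; simp)
          have hPe : pvQ x0 e = true := List.of_mem_filter (by rw [hdf]; simp : e ∈ dw.filter (pvQ x0))
          have hxe : pvX e = x0 := by simpa [pvQ] using hPe
          have hye : pvY e = c := H e (by
            have : e ∈ acc := hsplit ▸ List.mem_append.mpr (Or.inr hemem)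
            simp [hperm.mem_iff.mp this]) hxe
          obtain ⟨d0, ds, hdw⟩ : ∃ d0 ds, dw = d0 :: ds := by
            cases hdwx : dw with
            | nil => rw [hdwx] at hdf; cases hdf
            | cons d0 ds => exact ⟨d0, ds, rfl⟩
          have hbefd0 : pvBef q d0 = true := by
            have := List.head?_dropWhile_not (fun b => !pvBef q b) acc
            rw [← hdwdef, hdw] at this
            simpa using this
          have hdw_pw : List.Pairwise pvLexLE dw :=
            hacc_pw.sublist (List.dropWhile_sublist _)
          have hd0e : pvX d0 < pvX e ∨ (pvX d0 = pvX e ∧ pvY d0 ≤ pvY e) ∨ d0 = e := by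
            rw [hdw] at hemem hdw_pw
            rcases List.mem_cons.mp hemem with rfl | hm
            · right; right; rfl
            · rcases (List.pairwise_cons.mp hdw_pw).1 e hm with h | h
              · left; exact h
              · right; left; exact h
          have hbef : pvX q < pvX d0 ∨ (¬ pvX d0 < pvX q ∧ pvY q < pvY d0) := by
            unfold pvBef at hbefd0
            rcases Bool.or_eq_true_iff.mp hbefd0 with h | h
            · left; exact of_decide_eq_true h
            · right
              rcases Bool.and_eq_true_iff.mp h with ⟨h1, h2⟩
              exact ⟨by simpa using h1, of_decide_eq_true h2⟩
          rcases hd0e with h | h | rfl <;> omega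
    · rw [if_neg hPq]
      have htwdw : tw.filter (pvQ x0) ++ dw.filter (pvQ x0) = acc.filter (pvQ x0) := by
        conv_rhs => rw [hsplit]
        rw [List.filter_append]
      rw [htwdw]
      have : List.filter (pvQ x0) [q] = [] := by
        simp [hPq]
      rw [this, List.append_nil]
      exact ih H'


-- ===== A-side machinery: groups of the sorted list =====
def pvStepG (st : List (List (List Int)) × List (List Int)) (c : List Int) :
    List (List (List Int)) × List (List Int) :=
  match st.2 with
  | [] => (st.1, [c])
  | h :: _ => if pvX c = pvX h then (st.1, st.2 ++ [c]) else (st.1 ++ [st.2], [c])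

def pvGroups (s : List (List Int)) : List (List (List Int)) :=
  let st := s.foldl pvStepG ([], [])
  if st.2 = [] then st.1 else st.1 ++ [st.2]

def pvEmitG (g : List (List Int)) : List (List Int) :=
  if pvY (g.getLastD []) = pvY g.headI then [g.headI]
  else (PySem.List.pyRange (pvY g.headI) (pvY (g.getLastD []) + 1) 1).map (fun i => [pvX g.headI, i])

lemma pv_emit_eq (cur : List (List Int)) (r : List Int)
    (h1 : pvY r = pvY (cur.getLastD []))
    (h3 : cur.headI = r ↔ pvY cur.headI = pvY r) :
    pvEmitA (cur.headI, r) = pvEmitG cur := by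
  unfold pvEmitA pvEmitG
  by_cases hc : cur.headI = r
  · rw [if_pos hc, if_pos (by rw [← h1, ← h3.mp hc])]
  · rw [if_neg hc, if_neg (fun he => hc (h3.mpr (by rw [h1, he]))), h1]

-- the joint loop invariant: A's pairs list is 'base ++ pr', the group state is (gs, cur)
lemma pv_loop (s : List (List Int)) :
    ∀ (base : List (List Int × List Int)) (gs : List (List (List Int)))
      (cur : List (List Int)) (pr : List (List Int × List Int)),
    List.Pairwise pvLexLE (cur ++ s) →
    (∀ c ∈ cur, pvX c = pvX cur.headI) →
    ((base = [] ∧ gs = [] ∧ cur = [] ∧ pr = []) ∨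
     (∃ r, cur ≠ [] ∧ pr = [(cur.headI, r)] ∧
        base.flatMap pvEmitA = gs.flatMap pvEmitG ∧
        pvY r = pvY (cur.getLastD []) ∧ pvY cur.headI ≤ pvY r ∧
        (cur.headI = r ↔ pvY cur.headI = pvY r))) →
    (s.foldl pvStepA (base ++ pr)).flatMap pvEmitA =
      (let st := s.foldl pvStepG (gs, cur);
       if st.2 = [] then st.1 else st.1 ++ [st.2]).flatMap pvEmitG := by
  induction s with
  | nil =>
    intro base gs cur pr _ hX hinv
    rcases hinv with ⟨hb, hg, hc, hp⟩ | ⟨r, hne, hpr, hbe, h1, _, h3⟩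
    · subst hb; subst hg; subst hc; subst hp; simp
    · subst hpr
      simp only [List.foldl_nil]
      rw [if_neg hne]
      simp [List.flatMap_append, hbe, pv_emit_eq cur r h1 h3]
  | cons c s ih =>
    intro base gs cur pr hpw hX hinv
    rcases hinv with ⟨hb, hg, hc, hp⟩ | ⟨r, hne, hpr, hbe, h1, h2, h3⟩
    · subst hb; subst hg; subst hc; subst hp
      simp only [List.foldl_cons, List.nil_append]
      have hA : pvStepA [] c = [] ++ [(c, c)] := by simp [pvStepA]
      have hG : pvStepG ([], []) c = ([], [c]) := by simp [pvStepG]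
      rw [hA, hG]
      apply ih [] [] [c] [(c, c)]
      · simpa using hpw
      · intro x hx; simp at hx; subst hx; rfl
      · refine Or.inr ⟨c, by simp, ?_, ?_, ?_, ?_, ?_⟩
        · rfl
        · rfl
        · simp
        · simp
        · simp
    · subst hpr
      obtain ⟨hc, tc, hcur⟩ : ∃ h t, cur = h :: t := by
        cases cur with | nil => exact absurd rfl hne | cons h t => exact ⟨h, t, rfl⟩
      subst hcur
      have hhead : (hc :: tc).headI = hc := rfl
      rw [hhead] at h2 h3 ⊢
      have hlen : (base ++ [(hc, r)]).length ≠ 0 := by simp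
      have hlast : (base ++ [(hc, r)]).getLastD ([], []) = (hc, r) := List.getLastD_concat
      simp only [List.foldl_cons]
      by_cases hx : pvX c = pvX hc
      · -- same x: extend the current group
        have hGstep : pvStepG (gs, hc :: tc) c = (gs, (hc :: tc) ++ [c]) := by
          simp [pvStepG, hx]
        have hlastc : pvY ((hc :: tc).getLastD []) ≤ pvY c := by
          have hmem : (hc :: tc).getLastD [] ∈ hc :: tc := by
            rcases List.eq_nil_or_concat tc with h | ⟨t', a, h⟩ <;> subst h
            · simp
            · rw [List.concat_eq_append, ← List.cons_append, List.getLastD_concat]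
              simp
          have hle : pvLexLE ((hc :: tc).getLastD []) c :=
            (List.pairwise_append.mp hpw).2.2 _ hmem c (by simp)
          have hxl : pvX ((hc :: tc).getLastD []) = pvX hc := hX _ hmem
          rcases hle with h | ⟨_, h⟩
          · omega
          · exact h
        by_cases hy : pvY r < pvY c
        · have hAstep : pvStepA (base ++ [(hc, r)]) c = base ++ [(hc, c)] := by
            unfold pvStepA
            rw [if_neg hlen, hlast]
            rw [if_neg (not_not_intro hx), if_pos ⟨hx, hy⟩, List.dropLast_concat]
          rw [hAstep, hGstep]
          apply ih base gs ((hc :: tc) ++ [c]) [(hc, c)]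
          · rw [List.append_assoc]; simpa using hpw
          · intro x hxm
            rcases List.mem_append.mp hxm with hm | hm
            · exact hX x hm
            · simp at hm; subst hm; exact hx
          · refine Or.inr ⟨c, by simp, rfl, hbe, ?_, ?_, ?_⟩
            · rw [List.getLastD_concat]
            · show pvY ((hc :: tc) ++ [c]).headI ≤ pvY c
              have : ((hc :: tc) ++ [c]).headI = hc := rfl
              rw [this]; omega
            · have hh : ((hc :: tc) ++ [c]).headI = hc := rfl
              rw [hh]
              constructor
              · intro he; rw [he]
              · intro he; exfalso; omega
        · have hyc : pvY c = pvY r := by omega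
          have hAstep : pvStepA (base ++ [(hc, r)]) c = base ++ [(hc, r)] := by
            unfold pvStepA
            rw [if_neg hlen, hlast]
            rw [if_neg (not_not_intro hx), if_neg (fun h => hy h.2)]
          rw [hAstep, hGstep]
          apply ih base gs ((hc :: tc) ++ [c]) [(hc, r)]
          · rw [List.append_assoc]; simpa using hpw
          · intro x hxm
            rcases List.mem_append.mp hxm with hm | hm
            · exact hX x hm
            · simp at hm; subst hm; exact hx
          · refine Or.inr ⟨r, by simp, rfl, hbe, ?_, h2, h3⟩
            rw [List.getLastD_concat]; omega
      · -- new x: close the group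
        have hAstep : pvStepA (base ++ [(hc, r)]) c = (base ++ [(hc, r)]) ++ [(c, c)] := by
          unfold pvStepA
          rw [if_neg hlen, hlast]
          rw [if_pos hx]
        have hGstep : pvStepG (gs, hc :: tc) c = (gs ++ [hc :: tc], [c]) := by
          simp [pvStepG, hx]
        rw [hAstep, hGstep]
        apply ih (base ++ [(hc, r)]) (gs ++ [hc :: tc]) [c] [(c, c)]
        · exact (List.pairwise_append.mp hpw).2.1
        · intro x hxm; simp at hxm; subst hxm; rfl
        · refine Or.inr ⟨c, by simp, rfl, ?_, by simp, by simp, by simp⟩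
          rw [List.flatMap_append, List.flatMap_append, hbe]
          have hemit := pv_emit_eq (hc :: tc) r h1 (by simpa using h3)
          simp only [List.headI] at hemit
          simp only [List.flatMap_cons, List.flatMap_nil, List.append_nil]
          rw [hemit]

lemma pv_sub_eq (sub : List (List Int)) :
    ((PySem.List.sorted2 sub pvX pvY false).foldl pvStepA []).flatMap pvEmitA =
      (pvGroups (PySem.List.sorted2 sub pvX pvY false)).flatMap pvEmitG := by
  have h := pv_loop (PySem.List.sorted2 sub pvX pvY false) [] [] [] []
    (by simpa using pv_sorted2_pairwise sub) (by simp)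
    (Or.inl ⟨rfl, rfl, rfl, rfl⟩)
  simpa [pvGroups] using h

-- ===== block decomposition of pvGroups on a sorted list =====
lemma pv_groups_shift (l : List (List Int)) :
    ∀ gs cur, l.foldl pvStepG (gs, cur)
      = (gs ++ (l.foldl pvStepG ([], cur)).1, (l.foldl pvStepG ([], cur)).2) := by
  induction l with
  | nil => intro gs cur; simp
  | cons p l ih =>
    intro gs cur
    simp only [List.foldl_cons]
    cases cur with
    | nil =>
      show List.foldl pvStepG (gs, [p]) l = _
      rw [ih gs [p]]
      show _ = (gs ++ (List.foldl pvStepG ([], [p]) l).1, _)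
      rfl
    | cons h t =>
      by_cases hx : pvX p = pvX h
      · have e1 : pvStepG (gs, h :: t) p = (gs, (h :: t) ++ [p]) := by simp [pvStepG, hx]
        have e2 : pvStepG ([], h :: t) p = ([], (h :: t) ++ [p]) := by simp [pvStepG, hx]
        rw [e1, e2, ih gs ((h :: t) ++ [p])]
      · have e1 : pvStepG (gs, h :: t) p = (gs ++ [h :: t], [p]) := by simp [pvStepG, hx]
        have e2 : pvStepG ([], h :: t) p = ([] ++ [h :: t], [p]) := by simp [pvStepG, hx]
        rw [e1, e2, ih (gs ++ [h :: t]) [p], ih ([] ++ [h :: t]) [p]]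
        simp


lemma pv_groups_ne_nil (l : List (List Int)) :
    ∀ (st : List (List (List Int)) × List (List Int)), st.2 ≠ [] →
      (l.foldl pvStepG st).2 ≠ [] := by
  induction l with
  | nil => intro st h; exact h
  | cons p l ih =>
    intro st h
    simp only [List.foldl_cons]
    apply ih
    unfold pvStepG
    cases hst : st.2 with
    | nil => simp
    | cons a b => by_cases hx : pvX p = pvX a <;> simp [hx]


lemma pv_groups_same (tw : List (List Int)) :
    ∀ gs (cur : List (List Int)), cur ≠ [] → (∀ p ∈ tw, pvX p = pvX cur.headI) →
      tw.foldl pvStepG (gs, cur) = (gs, cur ++ tw) := by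
  induction tw with
  | nil => intro gs cur _ _; simp
  | cons p tw ih =>
    intro gs cur hne hall
    obtain ⟨h, t, rfl⟩ : ∃ h t, cur = h :: t := by
      cases cur with | nil => exact absurd rfl hne | cons h t => exact ⟨h, t, rfl⟩
    have hx : pvX p = pvX h := hall p (by simp)
    simp only [List.foldl_cons]
    have e1 : pvStepG (gs, h :: t) p = (gs, (h :: t) ++ [p]) := by simp [pvStepG, hx]
    rw [e1, ih gs ((h :: t) ++ [p]) (by simp) ?later]
    · simp
    case later =>
      intro q hq
      have : pvX q = pvX (h :: t).headI := hall q (by simp [hq])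
      simpa using this


lemma pv_groups_block (c : List Int) (rest : List (List Int)) :
    pvGroups (c :: rest)
      = (c :: rest.takeWhile (pvQ (pvX c))) :: pvGroups (rest.dropWhile (pvQ (pvX c))) := by
  set tw := rest.takeWhile (pvQ (pvX c)) with htwdef
  set dw := rest.dropWhile (pvQ (pvX c)) with hdwdef
  have htw : ∀ p ∈ tw, pvX p = pvX c := by
    intro p hp
    have := List.mem_takeWhile_imp hp
    simpa [pvQ] using this
  have hsplit : rest = tw ++ dw := (List.takeWhile_append_dropWhile).symm
  show (let st := (c :: rest).foldl pvStepG ([], []);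
    if st.2 = [] then st.1 else st.1 ++ [st.2]) = _
  rw [show (c :: rest).foldl pvStepG ([], []) = rest.foldl pvStepG ([], [c]) by rfl]
  conv_lhs => rw [hsplit]
  rw [List.foldl_append]
  rw [pv_groups_same _ [] [c] (by simp) (by simpa using htw)]
  cases hdw : dw with
  | nil =>
    simp only [List.foldl_nil]
    rw [if_neg (by simp)]
    simp [pvGroups]
  | cons d ds =>
    have hQd : pvQ (pvX c) d = false := by
      have := List.head?_dropWhile_not (pvQ (pvX c)) rest
      rw [← hdwdef, hdw] at this; simpa using this
    have hxd : ¬ pvX d = pvX c := by simpa [pvQ] using hQd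
    simp only [List.foldl_cons]
    rw [show pvStepG ([], [c] ++ tw) d = ([[c] ++ tw], [d]) by simp [pvStepG, hxd]]
    rw [pv_groups_shift ds [[c] ++ tw] [d]]
    have hne := pv_groups_ne_nil ds ([], [d]) (by simp)
    rw [if_neg hne]
    show _ = (c :: tw) ::
      (let st := (d :: ds).foldl pvStepG ([], []);
       if st.2 = [] then st.1 else st.1 ++ [st.2])
    rw [show (d :: ds).foldl pvStepG ([], []) = ds.foldl pvStepG ([], [d]) by rfl]
    rw [if_neg hne]
    simp

-- ===== A-side canonical form: flatMap over the strictly increasing key list =====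
lemma pv_dropWhile_gt (x0 : Int) (l : List (List Int)) (hpw : List.Pairwise pvLexLE l)
    (hle : ∀ p ∈ l, x0 ≤ pvX p) : ∀ p ∈ l.dropWhile (pvQ x0), x0 < pvX p := by
  induction l with
  | nil => intro p hp; cases hp
  | cons a l ih =>
    have hpwc := List.pairwise_cons.mp hpw
    rw [List.dropWhile_cons]
    by_cases hQ : pvQ x0 a
    · rw [if_pos hQ]
      exact ih hpwc.2 (fun p hp => hle p (List.mem_cons.mpr (Or.inr hp)))
    · rw [if_neg hQ]
      intro p hp
      have hax : x0 < pvX a := by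
        have := hle a (by simp)
        have hne : ¬ pvX a = x0 := by simpa [pvQ] using hQ
        omega
      rcases List.mem_cons.mp hp with rfl | hp'
      · exact hax
      · rcases hpwc.1 p hp' with h | ⟨h, _⟩ <;> omega

lemma pv_mainA : ∀ (n : Nat) (s : List (List Int)) (K : List Int), s.length ≤ n →
    List.Pairwise pvLexLE s → K.Pairwise (· < ·) → (∀ x, x ∈ K ↔ x ∈ s.map pvX) →
    (pvGroups s).flatMap pvEmitG
      = K.flatMap (fun x => pvEmitG (s.filter (pvQ x))) := by
  intro n
  induction n with
  | zero =>
    intro s K hlen _ _ hmem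
    have hs : s = [] := List.eq_nil_of_length_eq_zero (Nat.le_zero.mp hlen)
    subst hs
    have hK : K = [] := by
      apply List.eq_nil_iff_forall_not_mem.mpr
      intro x hx
      simpa using (hmem x).mp hx
    subst hK
    simp [pvGroups]
  | succ n ih =>
    intro s K hlen hpw hKpw hmem
    cases s with
    | nil =>
      have hK : K = [] := by
        apply List.eq_nil_iff_forall_not_mem.mpr
        intro x hx
        simpa using (hmem x).mp hx
      subst hK
      simp [pvGroups]
    | cons c rest =>
      have hpwc := List.pairwise_cons.mp hpw
      set tw := rest.takeWhile (pvQ (pvX c)) with htwdef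
      set dw := rest.dropWhile (pvQ (pvX c)) with hdwdef
      have htw : ∀ p ∈ tw, pvX p = pvX c := by
        intro p hp
        have := List.mem_takeWhile_imp hp
        simpa [pvQ] using this
      have hsplit : rest = tw ++ dw := (List.takeWhile_append_dropWhile).symm
      have hdw_pw : List.Pairwise pvLexLE dw :=
        hpwc.2.sublist (List.dropWhile_sublist (pvQ (pvX c)))
      have hdwgt : ∀ p ∈ dw, pvX c < pvX p :=
        pv_dropWhile_gt (pvX c) rest hpwc.2
          (fun p hp => by rcases hpwc.1 p hp with h | ⟨h, _⟩ <;> omega)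
      have hfilter0 : (c :: rest).filter (pvQ (pvX c)) = c :: tw := by
        rw [List.filter_cons_of_pos (by simp [pvQ])]
        congr 1
        conv_lhs => rw [hsplit]
        rw [List.filter_append]
        rw [List.filter_eq_self.mpr (fun p hp => by simp [pvQ, htw p hp])]
        rw [List.filter_eq_nil_iff.mpr (fun p hp => by
          have := hdwgt p hp
          simp [pvQ]; omega)]
        simp
      have hfilterx : ∀ x, pvX c < x → (c :: rest).filter (pvQ x) = dw.filter (pvQ x) := by
        intro x hx
        rw [List.filter_cons_of_neg (by simp [pvQ]; omega)]
        conv_lhs => rw [hsplit]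
        rw [List.filter_append]
        rw [List.filter_eq_nil_iff.mpr (fun p hp => by
          have := htw p hp
          simp [pvQ]; omega)]
        simp
      have hx0K : pvX c ∈ K := (hmem (pvX c)).mpr (by simp)
      obtain ⟨h, K', rfl⟩ : ∃ h K', K = h :: K' := by
        cases K with
        | nil => cases hx0K
        | cons h K' => exact ⟨h, K', rfl⟩
      have hKc := List.pairwise_cons.mp hKpw
      have hh : h = pvX c := by
        by_contra hne
        have hhs : h ∈ (c :: rest).map pvX := (hmem h).mp (by simp)
        have hgt : pvX c < h := by
          rcases List.mem_map.mp hhs with ⟨p, hp, rfl⟩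
          rcases List.mem_cons.mp hp with rfl | hp'
          · exact absurd rfl hne
          · rw [hsplit] at hp'
            rcases List.mem_append.mp hp' with hp2 | hp2
            · exact absurd (htw p hp2) hne
            · exact hdwgt p hp2
        rcases List.mem_cons.mp hx0K with he | hmem'
        · omega
        · have := hKc.1 _ hmem'
          omega
      subst hh
      have hmem' : ∀ x, x ∈ K' ↔ x ∈ dw.map pvX := by
        intro x
        constructor
        · intro hx
          have hgt : pvX c < x := hKc.1 _ hx
          have hxs : x ∈ (c :: rest).map pvX := (hmem x).mp (by simp [hx])
          rcases List.mem_map.mp hxs with ⟨p, hp, rfl⟩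
          rcases List.mem_cons.mp hp with rfl | hp'
          · omega
          · rw [hsplit] at hp'
            rcases List.mem_append.mp hp' with hp2 | hp2
            · have := htw p hp2; omega
            · exact List.mem_map.mpr ⟨p, hp2, rfl⟩
        · intro hx
          rcases List.mem_map.mp hx with ⟨p, hp, rfl⟩
          have hgt : pvX c < pvX p := hdwgt p hp
          have hxs : pvX p ∈ pvX c :: K' := (hmem (pvX p)).mpr
            (List.mem_map.mpr ⟨p, by
              rw [hsplit]
              exact List.mem_cons.mpr (Or.inr (List.mem_append.mpr (Or.inr hp))), rfl⟩)
          rcases List.mem_cons.mp hxs with he | hm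
          · omega
          · exact hm
      have hlen' : dw.length ≤ n := by
        have h1 : dw.length ≤ rest.length := (List.dropWhile_sublist _).length_le
        have h2 : rest.length + 1 ≤ n + 1 := by simpa using hlen
        omega
      rw [pv_groups_block, List.flatMap_cons, List.flatMap_cons]
      rw [ih dw K' hlen' hdw_pw hKc.2 hmem']
      rw [hfilter0]
      congr 1
      apply List.flatMap_congr
      intro x hx
      have hgt : pvX c < x := hKc.1 _ hx
      rw [hfilterx x hgt]


-- ===== B-side dict characterization =====
def pvCombStep (o : Option (List Int × Int × Int)) (p : List Int) :
    Option (List Int × Int × Int) :=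
  match o with
  | none => some (p, pvY p, pvY p)
  | some e => some (e.1, if pvY p < e.2.1 then pvY p else e.2.1,
                    if e.2.2 < pvY p then pvY p else e.2.2)

lemma pv_agg_step_get_self (d : PySem.Dict Int (List Int × Int × Int)) (p : List Int) :
    (pvAggStep d p).get? (pvX p) = pvCombStep (d.get? (pvX p)) p := by
  unfold pvAggStep
  cases hg : d.get? (pvX p) with
  | none => simp [pvCombStep, PySem.Dict.get?_insert_self]
  | some e => simp [pvCombStep, PySem.Dict.get?_insert_self]

lemma pv_agg_step_get_ne (d : PySem.Dict Int (List Int × Int × Int)) (p : List Int)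
    (x : Int) (h : x ≠ pvX p) : (pvAggStep d p).get? x = d.get? x := by
  unfold pvAggStep
  cases hg : d.get? (pvX p) <;> simp [PySem.Dict.get?_insert_of_ne (hne := h)]

lemma pv_agg_get (l : List (List Int)) :
    ∀ (d : PySem.Dict Int (List Int × Int × Int)) (x : Int),
      (l.foldl pvAggStep d).get? x = (l.filter (pvQ x)).foldl pvCombStep (d.get? x) := by
  induction l with
  | nil => intro d x; rfl
  | cons p l ih =>
    intro d x
    simp only [List.foldl_cons]
    by_cases hx : pvX p = x
    · have hq : pvQ x p = true := by simp [pvQ, hx]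
      rw [List.filter_cons_of_pos hq]
      simp only [List.foldl_cons]
      rw [ih]
      subst hx
      rw [pv_agg_step_get_self]
    · have hq : ¬ pvQ x p = true := by simp [pvQ, hx]
      rw [List.filter_cons_of_neg hq, ih, pv_agg_step_get_ne d p x (fun h => hx h.symm)]

lemma pv_agg_keys (sub : List (List Int)) :
    (sub.foldl pvAggStep PySem.Dict.empty).keys = PySem.Set.ofList (sub.map pvX) := by
  have hstep : ∀ (d : PySem.Dict Int (List Int × Int × Int)) p, pvAggStep d p
      = d.insert (pvX p) (match d.get? (pvX p) with
        | none => (p, pvY p, pvY p)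
        | some e => (e.1, if pvY p < e.2.1 then pvY p else e.2.1,
            if e.2.2 < pvY p then pvY p else e.2.2)) := by
    intro d p
    unfold pvAggStep
    cases hg : d.get? (pvX p) <;> simp
  have : sub.foldl pvAggStep PySem.Dict.empty
      = sub.foldl (fun d p => d.insert (pvX p) (match d.get? (pvX p) with
        | none => (p, pvY p, pvY p)
        | some e => (e.1, if pvY p < e.2.1 then pvY p else e.2.1,
            if e.2.2 < pvY p then pvY p else e.2.2))) PySem.Dict.empty := by
    congr 1
    funext d p
    exact hstep d p
  rw [this, PySem.Dict.keys_foldl_insert_key]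
  simp [PySem.Set.update_nil_left]


lemma pv_comb_char (l : List (List Int)) :
    ∀ (r : List Int) (lo hi : Int),
      l.foldl pvCombStep (some (r, lo, hi))
        = some (r, (l.map pvY).foldl min lo, (l.map pvY).foldl max hi) := by
  induction l with
  | nil => intro r lo hi; rfl
  | cons p l ih =>
    intro r lo hi
    simp only [List.foldl_cons, List.map_cons]
    have h1 : (if pvY p < lo then pvY p else lo) = min lo (pvY p) := by
      rw [min_def]; split_ifs <;> omega
    have h2 : (if hi < pvY p then pvY p else hi) = max hi (pvY p) := by
      rw [max_def]; split_ifs <;> omega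
    have hstep : pvCombStep (some (r, lo, hi)) p
        = some (r, min lo (pvY p), max hi (pvY p)) := by
      show some (r, if pvY p < lo then pvY p else lo, if hi < pvY p then pvY p else hi) = _
      rw [h1, h2]
    rw [hstep]
    exact ih r (min lo (pvY p)) (max hi (pvY p))


-- ===== per-key agreement and assembly =====
lemma pv_pairwise_y (l : List (List Int)) (x : Int) (hall : ∀ p ∈ l, pvX p = x)
    (hpw : List.Pairwise pvLexLE l) : List.Pairwise (fun a b => pvY a ≤ pvY b) l := by
  induction l with
  | nil => exact List.Pairwise.nil
  | cons a t ih =>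
    have hc := List.pairwise_cons.mp hpw
    refine List.pairwise_cons.mpr ⟨?_, ih (fun p hp => hall p (by simp [hp])) hc.2⟩
    intro b hb
    have hxa := hall a (by simp)
    have hxb := hall b (by simp [hb])
    rcases hc.1 b hb with h | ⟨_, h⟩
    · omega
    · exact h

lemma pv_le_getLast? (l : List (List Int))
    (hpw : List.Pairwise (fun a b => pvY a ≤ pvY b) l) :
    ∀ p ∈ l, ∀ m, l.getLast? = some m → pvY p ≤ pvY m := by
  induction l with
  | nil => intro p hp; cases hp
  | cons a t ih =>
    have hc := List.pairwise_cons.mp hpw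
    intro p hp m hm
    cases t with
    | nil =>
      simp at hm hp
      subst hm; subst hp; exact le_refl _
    | cons b t' =>
      rw [List.getLast?_cons_cons] at hm
      rcases List.mem_cons.mp hp with rfl | hp'
      · exact hc.1 m (List.mem_of_getLast? hm)
      · exact ih hc.2 p hp' m hm

lemma pv_perkey (sub : List (List Int)) (x : Int) (hx : x ∈ sub.map pvX) :
    ∃ e, (sub.foldl pvAggStep PySem.Dict.empty).get? x = some e ∧
      pvEmitG ((PySem.List.sorted2 sub pvX pvY false).filter (pvQ x)) = pvEmitB e x := by
  -- the original-order class and its decomposition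
  obtain ⟨q, t, hgb⟩ : ∃ q t, sub.filter (pvQ x) = q :: t := by
    rcases List.mem_map.mp hx with ⟨p, hp, rfl⟩
    cases hf : sub.filter (pvQ (pvX p)) with
    | nil =>
      exfalso
      have : p ∈ sub.filter (pvQ (pvX p)) := List.mem_filter.mpr ⟨hp, by simp [pvQ]⟩
      rw [hf] at this; cases this
    | cons q t => exact ⟨q, t, rfl⟩
  have hget : (sub.foldl pvAggStep PySem.Dict.empty).get? x
      = some (q, (t.map pvY).foldl min (pvY q), (t.map pvY).foldl max (pvY q)) := by
    rw [pv_agg_get sub PySem.Dict.empty x, PySem.Dict.get?_empty, hgb]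
    simp only [List.foldl_cons]
    rw [show pvCombStep none q = some (q, pvY q, pvY q) from rfl]
    exact pv_comb_char t q (pvY q) (pvY q)
  set LO := (t.map pvY).foldl min (pvY q) with hLOdef
  set HI := (t.map pvY).foldl max (pvY q) with hHIdef
  refine ⟨(q, LO, HI), hget, ?_⟩
  -- the sorted-order class
  set s := PySem.List.sorted2 sub pvX pvY false with hsdef
  have hperm : (s.filter (pvQ x)).Perm (sub.filter (pvQ x)) :=
    (PySem.List.sorted2_perm sub pvX pvY false).filter (pvQ x)
  obtain ⟨q', t', hgs⟩ : ∃ q' t', s.filter (pvQ x) = q' :: t' := by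
    cases hf : s.filter (pvQ x) with
    | nil =>
      exfalso
      rw [hf, hgb] at hperm
      exact absurd hperm.length_eq (by simp)
    | cons q' t' => exact ⟨q', t', rfl⟩
  have hallx : ∀ p ∈ s.filter (pvQ x), pvX p = x := by
    intro p hp
    have := List.of_mem_filter hp
    simpa [pvQ] using this
  have hpwY : List.Pairwise (fun a b => pvY a ≤ pvY b) (s.filter (pvQ x)) :=
    pv_pairwise_y _ x hallx ((pv_sorted2_pairwise sub).sublist List.filter_sublist)
  -- min/max facts on the dict side
  have hminle : ∀ p ∈ sub.filter (pvQ x), LO ≤ pvY p := by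
    intro p hp
    rw [hgb] at hp
    have h := PySem.List.foldl_min_le (t.map pvY) (pvY q)
    rcases List.mem_cons.mp hp with rfl | hp'
    · exact h.1
    · exact h.2 (pvY p) (List.mem_map.mpr ⟨p, hp', rfl⟩)
  have hminmem : ∃ p ∈ sub.filter (pvQ x), LO = pvY p := by
    rcases PySem.List.foldl_min_mem (t.map pvY) (pvY q) with h | h
    · exact ⟨q, by rw [hgb]; simp, h⟩
    · rcases List.mem_map.mp h with ⟨p, hp, he⟩
      exact ⟨p, by rw [hgb]; simp [hp], he.symm⟩
  have hmaxge : ∀ p ∈ sub.filter (pvQ x), pvY p ≤ HI := by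
    intro p hp
    rw [hgb] at hp
    have h := PySem.List.le_foldl_max (t.map pvY) (pvY q)
    rcases List.mem_cons.mp hp with rfl | hp'
    · exact h.1
    · exact h.2 (pvY p) (List.mem_map.mpr ⟨p, hp', rfl⟩)
  have hmaxmem : ∃ p ∈ sub.filter (pvQ x), HI = pvY p := by
    rcases PySem.List.foldl_max_mem (t.map pvY) (pvY q) with h | h
    · exact ⟨q, by rw [hgb]; simp, h⟩
    · rcases List.mem_map.mp h with ⟨p, hp, he⟩
      exact ⟨p, by rw [hgb]; simp [hp], he.symm⟩
  -- the sorted class's last element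
  obtain ⟨gl, hgl⟩ : ∃ gl, (q' :: t').getLast? = some gl := by
    cases hg : (q' :: t').getLast? with
    | none => exact absurd hg (by simp)
    | some gl => exact ⟨gl, rfl⟩
  have hglD : (q' :: t').getLastD [] = gl := by
    rw [List.getLastD_eq_getLast?, hgl]; rfl
  have hglmem : gl ∈ s.filter (pvQ x) := by
    rw [hgs]; exact List.mem_of_getLast? hgl
  have hq'mem : q' ∈ s.filter (pvQ x) := by rw [hgs]; simp
  -- head is min, last is max
  have hheadle : ∀ p ∈ s.filter (pvQ x), pvY q' ≤ pvY p := by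
    intro p hp
    rw [hgs] at hp
    rcases List.mem_cons.mp hp with rfl | hp'
    · exact le_refl _
    · exact List.rel_of_pairwise_cons (R := fun a b => pvY a ≤ pvY b) (hgs ▸ hpwY) hp'
  have hlastge : ∀ p ∈ s.filter (pvQ x), pvY p ≤ pvY gl :=
    fun p hp => pv_le_getLast? _ (hgs ▸ hpwY) p (hgs ▸ hp) gl hgl
  have hLO : LO = pvY q' := by
    have h1 : LO ≤ pvY q' := hminle q' (hperm.mem_iff.mp hq'mem)
    have h2 : pvY q' ≤ LO := by
      rcases hminmem with ⟨p, hp, he⟩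
      rw [he]
      exact hheadle p (hperm.mem_iff.mpr hp)
    omega
  have hHI : HI = pvY gl := by
    have h1 : pvY gl ≤ HI := hmaxge gl (hperm.mem_iff.mp hglmem)
    have h2 : HI ≤ pvY gl := by
      rcases hmaxmem with ⟨p, hp, he⟩
      rw [he]
      exact hlastge p (hperm.mem_iff.mpr hp)
    omega
  -- assemble
  unfold pvEmitG pvEmitB
  rw [hgs, hglD]
  show (if pvY gl = pvY (q' :: t').headI then [(q' :: t').headI] else _) = _
  have hxq' : pvX q' = x := hallx q' hq'mem
  have hheadI : (q' :: t').headI = q' := rfl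
  rw [hheadI]
  by_cases heq : LO = HI
  · rw [if_pos (by omega), if_pos heq]
    -- stability: all class members share one y, so sorted-first = original-first
    have hstab := pv_stable sub x LO (fun p hp hpx => by
      have hpf : p ∈ sub.filter (pvQ x) := List.mem_filter.mpr ⟨hp, by simp [pvQ, hpx]⟩
      have := hminle p hpf
      have := hmaxge p hpf
      omega)
    rw [← hsdef, hgs, hgb] at hstab
    simp only [List.head?_cons, Option.some.injEq] at hstab
    rw [hstab]
  · rw [if_neg (by omega), if_neg heq, hxq', ← hLO, ← hHI]


lemma pv_sub_full (sub : List (List Int)) :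
    ((PySem.List.sorted2 sub pvX pvY false).foldl pvStepA []).flatMap pvEmitA
      = (PySem.List.sorted (sub.foldl pvAggStep PySem.Dict.empty).keys (fun x => x) false).foldl
          (fun ps x => match (sub.foldl pvAggStep PySem.Dict.empty).get? x with
            | some e => ps ++ pvEmitB e x
            | none => ps) [] := by
  rw [pv_sub_eq]
  have hkeys : (sub.foldl pvAggStep PySem.Dict.empty).keys
      = PySem.Set.ofList (sub.map pvX) := pv_agg_keys sub
  set agg := sub.foldl pvAggStep PySem.Dict.empty with haggdef
  set K := PySem.List.sorted agg.keys (fun x => x) false with hKdef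
  have hKpw : K.Pairwise (· < ·) := by
    rw [hKdef, hkeys]
    exact PySem.List.sorted_ofList_pairwise_lt _
  have hmapperm : ((PySem.List.sorted2 sub pvX pvY false).map pvX).Perm (sub.map pvX) :=
    (PySem.List.sorted2_perm sub pvX pvY false).map pvX
  have hmemK : ∀ x, x ∈ K ↔ x ∈ (PySem.List.sorted2 sub pvX pvY false).map pvX := by
    intro x
    rw [hKdef, PySem.List.mem_sorted, hkeys, PySem.Set.mem_ofList]
    exact hmapperm.mem_iff.symm
  rw [pv_mainA (PySem.List.sorted2 sub pvX pvY false).length _ K le_rfl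
    (pv_sorted2_pairwise sub) hKpw hmemK]
  have hfn : (fun (ps : List (List Int)) x => match agg.get? x with
        | some e => ps ++ pvEmitB e x
        | none => ps)
      = fun ps x => ps ++ (match agg.get? x with
        | some e => pvEmitB e x
        | none => []) := by
    funext ps x
    cases agg.get? x <;> simp
  rw [hfn, PySem.List.foldl_append_eq_flatMap, List.nil_append]
  apply List.flatMap_congr
  intro x hxK
  have hx : x ∈ sub.map pvX := hmapperm.mem_iff.mp ((hmemK x).mp hxK)
  obtain ⟨e, hge, hemit⟩ := pv_perkey sub x hx
  rw [hge] at *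
  rw [hemit]


-- ===== VERDICT (by name: the statement is the Claim_ definition above) =====
theorem fillContour_spec : Claim_equal_fillContour := by
  intro cs _ _
  unfold Spec_fillContour fillContour fillContour_alt
  rw [PySem.List.foldl_append_singleton_eq_map, PySem.List.foldl_append_singleton_eq_map,
    PySem.List.foldl_append_singleton_eq_map]
  simp only [List.nil_append, List.map_map]
  refine List.map_congr_left ?_
  intro sub _
  simp only [Function.comp]
  rw [PySem.List.foldl_append_eq_flatMap, List.nil_append]
  exact pv_sub_full sub
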